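-- pv_equiv track=rewrite | github.com/Alferdize/Data-Structure-and-Algorithms | Algorithms/binary_search.com/contest_8/popularity.py | solve
-- ===== SOURCE A (Python) =====
-- def solve(edges):
--     from collections import defaultdict
--     adj = defaultdict(list)
--     for a, b in edges:
--         adj[a].append(b)
--         adj[b].append(a)
--
--     count = defaultdict(int)
--
--     def dfs(x, parent):
--         count[x] = 1
--         for nb in adj[x]:
--             if nb == parent:
--                 continue
--             count[x] += dfs(nb, x)
--         return count[x]
--     dfs(0, -1)
--     ans = []
--     for a, b in edges:
--         x = min(count[a], count[b])
--         ans.append(x * (count[0] - x))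
--     return ans
-- ===== SOURCE B (Python) =====
-- def solve(edges):
--     adj = {}
--     for a, b in edges:
--         adj.setdefault(a, []).append(b)
--         adj.setdefault(b, []).append(a)
--     parent = {0: -1}
--     order = [0]
--     i = 0
--     while i < len(order):
--         x = order[i]
--         i += 1
--         for nb in adj.get(x, []):
--             if nb not in parent:
--                 parent[nb] = x
--                 order.append(nb)
--     count = {x: 1 for x in order}
--     for x in reversed(order):
--         if x != 0:
--             count[parent[x]] += count[x]
--     total = count[0]
--     ans = []
--     for a, b in edges:
--         s = count.get(a, 0)
--         t = count.get(b, 0)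
--         m = s if s < t else t
--         ans.append(m * (total - m))
--     return ans
-- ===== Notes on version B (the rewrite author's own statement) =====
-- stated objective: alternative
-- what changed: Replaces the recursive dfs with a mutable-closure count dict by an iterative BFS that records a parent map and visit order, then accumulates subtree sizes in one reverse pass over the order; adjacency build and final edge loop are kept.
-- intended difference: On forests containing an edge between 0 and -1, A returns 0 for that edge and undercounts the whole subtree under -1 (it skips the real vertex -1 next to the root because -1 is its parent sentinel), while B's visited-set BFS returns the true subtree-split product, which is what the function is for; e.g. on [(0,-1)] A returns [0], B returns [1]. — e.g. on solve([(0, -1)]): A returns [0], B returns [1]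
-- outside the precondition, e.g. on solve([(0, 1), (0, 1)]): A returns [2, 2], B returns [1, 1]; on solve([(0, 1), (1, 2), (1, 2)]): A returns [3, 3, 3], B returns [2, 2, 2]; on solve([(1, 2), (2, 3), (3, 1)]): A returns [0, 0, 0], B returns [0, 0, 0]
import Mathlib
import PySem

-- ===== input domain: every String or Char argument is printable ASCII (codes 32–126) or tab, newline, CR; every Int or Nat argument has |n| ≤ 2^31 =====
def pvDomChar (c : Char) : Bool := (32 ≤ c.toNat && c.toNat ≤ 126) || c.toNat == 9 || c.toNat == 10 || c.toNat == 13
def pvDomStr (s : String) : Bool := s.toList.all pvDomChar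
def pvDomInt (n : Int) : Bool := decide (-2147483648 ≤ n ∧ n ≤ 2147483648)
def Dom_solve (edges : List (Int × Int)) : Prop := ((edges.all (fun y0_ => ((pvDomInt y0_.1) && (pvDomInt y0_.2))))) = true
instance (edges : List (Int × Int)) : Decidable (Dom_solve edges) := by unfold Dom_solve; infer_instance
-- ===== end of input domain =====

-- B replaces A's recursive dfs (mutable count dict) by an iterative BFS + reverse
-- accumulation pass; same adjacency build and final edge loop.  Equality of the
-- RETURN value is what is proved (neither version mutates its argument).

-- ===== PORT A =====

def buildAdjA (edges : List (Int × Int)) : PySem.Dict Int (List Int) :=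
  edges.foldl (fun d p =>
    let d1 := d.insert p.1 (d.getD p.1 [] ++ [p.2])
    d1.insert p.2 (d1.getD p.2 [] ++ [p.1])) PySem.Dict.empty

-- the recursive dfs; fuel models Python's (unbounded) recursion, `none` = the
-- recursion does not terminate (RecursionError); under Pre_solve the fuel given
-- in `solve` is proved sufficient.  The read `c.getD x 0` BEFORE the child call
-- mirrors CPython's evaluation order of `count[x] += dfs(nb, x)`.
def dfsA (adj : PySem.Dict Int (List Int)) :
    Nat → Int → Int → PySem.Dict Int Int → Option (PySem.Dict Int Int × Int)
  | 0, _, _, _ => none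
  | Nat.succ f, x, p, c =>
    match (adj.getD x []).foldl
        (fun acc nb =>
          match acc with
          | none => none
          | some cc =>
            if nb = p then some cc
            else
              match dfsA adj f nb x cc with
              | none => none
              | some (cc', rr) => some (cc'.insert x (cc.getD x 0 + rr)))
        (some (c.insert x 1)) with
    | none => none
    | some c' => some (c', c'.getD x 0)

def solve (edges : List (Int × Int)) : List Int :=
  let adj := buildAdjA edges
  match dfsA adj (2 * edges.length + 3) 0 (-1) PySem.Dict.empty with
  | none => []      -- unreachable under Pre_solve (RecursionError in Python)
  | some (cnt, _) =>
    edges.map (fun p =>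
      let x := min (cnt.getD p.1 0) (cnt.getD p.2 0)
      x * (cnt.getD 0 0 - x))

-- ===== PORT B =====

def buildAdjB (edges : List (Int × Int)) : PySem.Dict Int (List Int) :=
  edges.foldl (fun d p =>
    let d1 := d.insert p.1 (d.getD p.1 [] ++ [p.2])
    d1.insert p.2 (d1.getD p.2 [] ++ [p.1])) PySem.Dict.empty

-- the `while i < len(order)` loop; fuel 2*len(edges)+2 always suffices because
-- `order` holds distinct vertices of the edge list (plus 0).
def bfsB (adj : PySem.Dict Int (List Int)) :
    Nat → List Int → Nat → PySem.Dict Int Int → List Int × PySem.Dict Int Int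
  | 0, order, _, par => (order, par)
  | Nat.succ f, order, i, par =>
    if i < order.length then
      let x := order.getD i 0
      let s := (adj.getD x []).foldl
        (fun s nb => if s.2.contains nb then s else (s.1 ++ [nb], s.2.insert nb x))
        (order, par)
      bfsB adj f s.1 (i + 1) s.2
    else (order, par)

def solve_alt (edges : List (Int × Int)) : List Int :=
  let adj := buildAdjB edges
  let st := bfsB adj (2 * edges.length + 2) [0] 0 (PySem.Dict.empty.insert 0 (-1))
  let order := st.1
  let par := st.2
  let cnt0 := order.foldl (fun c x => c.insert x 1) PySem.Dict.empty
  let cnt := order.reverse.foldl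
    (fun c x => if x = 0 then c
      else c.insert (par.getD x 0) (c.getD (par.getD x 0) 0 + c.getD x 0)) cnt0
  let total := cnt.getD 0 0
  edges.map (fun p =>
    let s : Int := cnt.getD p.1 0
    let t : Int := cnt.getD p.2 0
    let m := if s < t then s else t
    m * (total - m))

-- ===== PRECONDITION & SPEC =====

-- the unordered normal form of an edge
def normP (p : Int × Int) : Int × Int := (min p.1 p.2, max p.1 p.2)

-- all vertices occurring in the input, plus the root 0
def vertF (edges : List (Int × Int)) : Finset Int :=
  insert 0 (edges.flatMap (fun p => [p.1, p.2])).toFinset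

-- Pre_solve: the natural domain of the task — the edge list is a simple forest
-- (no self-loop, no repeated unordered edge, and — the textbook acyclicity
-- condition — every nonempty set of vertices spans fewer edges than it has
-- vertices).  Outside this domain A is not about subtree sizes at all: on any
-- cycle of length ≥ 3 through 0's component its recursion never returns
-- (RecursionError), and on duplicated edges it re-walks doubled subtrees and
-- returns inflated counts (e.g. [(0,1),(0,1)] → A [2,2] vs B [1,1]); the cites
-- in claim.json list such excluded inputs, including ones where A and B agree
-- (a self-loop or cycle away from 0, where both output zeros).
def Pre_solve (edges : List (Int × Int)) : Prop :=
  (∀ p ∈ edges, p.1 ≠ p.2) ∧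
  (edges.map normP).Nodup ∧
  (∀ S ∈ (vertF edges).powerset, S.Nonempty →
      (edges.filter (fun p => decide (p.1 ∈ S ∧ p.2 ∈ S))).length < S.card)

instance (edges : List (Int × Int)) : Decidable (Pre_solve edges) := by
  unfold Pre_solve; infer_instance

def pvWitness_solve : (List (Int × Int)) := ([(0, 1), (1, 2)])

-- On forests with an edge between 0 and -1, A returns 0 for that edge and
-- undercounts the whole subtree under -1 (it never visits the real vertex -1
-- adjacent to the root, because -1 is its parent sentinel), while B's
-- visited-set BFS returns the true subtree-split products, which is what the
-- function is for (e.g. on [(0,-1)] A returns [0], B returns [1]).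
def D_solve (edges : List (Int × Int)) : Prop :=
  (0, -1) ∈ edges ∨ (-1, 0) ∈ edges

instance (edges : List (Int × Int)) : Decidable (D_solve edges) := by
  unfold D_solve; infer_instance

def Spec_solve (edges : List (Int × Int)) (out : List Int) : Prop :=
  ¬ D_solve edges → out = solve_alt edges

instance (edges : List (Int × Int)) (out : List Int) : Decidable (Spec_solve edges out) := by
  unfold Spec_solve; infer_instance

def pvDiffWitness_solve : (List (Int × Int)) := ([(0, -1)])

def pvDiffWitnessOut_solve : (List Int) × (List Int) := ([0], [1])

-- ===== CLAIM (what is proved, stated in full; the proofs are below) =====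

def Claim_unchanged_solve : Prop :=
  ∀ (edges : List (Int × Int)), Dom_solve edges → Pre_solve edges →
    Spec_solve edges (solve edges)

def Claim_changed_solve : Prop :=
  Dom_solve (pvDiffWitness_solve) ∧ Pre_solve (pvDiffWitness_solve) ∧
  D_solve (pvDiffWitness_solve) ∧
  solve (pvDiffWitness_solve) = pvDiffWitnessOut_solve.1 ∧
  solve_alt (pvDiffWitness_solve) = pvDiffWitnessOut_solve.2 ∧
  pvDiffWitnessOut_solve.1 ≠ pvDiffWitnessOut_solve.2

def Claim_exact_solve : Prop :=
  ∀ (edges : List (Int × Int)), Dom_solve edges → Pre_solve edges → D_solve edges →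
    solve edges ≠ solve_alt edges

-- ===== LEMMAS AND PROOFS =====


-- ---------- proof-side abbreviations ----------


def bfsRes (edges : List (Int × Int)) : List Int × PySem.Dict Int Int :=
  bfsB (buildAdjA edges) (2 * edges.length + 2) [0] 0 (PySem.Dict.empty.insert 0 (-1))

def ordE (edges : List (Int × Int)) : List Int := (bfsRes edges).1
def parE (edges : List (Int × Int)) : PySem.Dict Int Int := (bfsRes edges).2
def parD (edges : List (Int × Int)) (v : Int) : Int := (parE edges).getD v 0
def rnk (edges : List (Int × Int)) (v : Int) : Nat := (ordE edges).idxOf v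

-- ---------- module G : the adjacency dict ----------

def adjStep (d : PySem.Dict Int (List Int)) (p : Int × Int) : PySem.Dict Int (List Int) :=
  let d1 := d.insert p.1 (d.getD p.1 [] ++ [p.2])
  d1.insert p.2 (d1.getD p.2 [] ++ [p.1])

lemma buildAdjA_eq_foldl (edges : List (Int × Int)) :
    buildAdjA edges = edges.foldl adjStep PySem.Dict.empty := rfl

lemma adj_count_aux (l : List (Int × Int)) (d : PySem.Dict Int (List Int)) (u v : Int) :
    ((l.foldl adjStep d).getD u []).count v
      = (d.getD u []).count v + l.count (u, v) + l.count (v, u) := by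
  induction l generalizing d with
  | nil => simp
  | cons p t ih =>
    rcases p with ⟨a, b⟩
    rw [List.foldl_cons, ih]
    have hstep : ((adjStep d (a, b)).getD u []).count v
        = (d.getD u []).count v + (if a = u ∧ b = v then 1 else 0)
          + (if b = u ∧ a = v then 1 else 0) := by
      simp only [adjStep, PySem.Dict.getD_insert]
      by_cases hb : u = b
      · subst hb
        by_cases ha : u = a
        · subst ha
          simp only [if_pos rfl, List.count_append, List.count_cons, List.count_nil]
          split_ifs <;> simp_all <;> omega
        · have ha' : ¬ (a = u) := fun h => ha h.symm
          simp only [if_pos rfl, if_neg ha', List.count_append, List.count_cons, List.count_nil]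
          split_ifs <;> simp_all <;> omega
      · by_cases ha : u = a
        · subst ha
          simp only [if_neg hb, if_pos rfl, List.count_append, List.count_cons, List.count_nil]
          split_ifs <;> simp_all <;> omega
        · simp only [if_neg hb, if_neg ha]
          split_ifs <;> simp_all <;> omega
    rw [hstep]
    have h1 : List.count (u, v) ((a, b) :: t) = t.count (u, v) + (if a = u ∧ b = v then 1 else 0) := by
      rw [List.count_cons]; split_ifs with h h2 h2 <;> simp_all [Prod.ext_iff] <;> omega
    have h2 : List.count (v, u) ((a, b) :: t) = t.count (v, u) + (if b = u ∧ a = v then 1 else 0) := by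
      rw [List.count_cons]; split_ifs with h h2 h2 <;> simp_all [Prod.ext_iff] <;> omega
    rw [h1, h2]; omega

lemma adj_count (edges : List (Int × Int)) (u v : Int) :
    ((buildAdjA edges).getD u []).count v = edges.count (u, v) + edges.count (v, u) := by
  rw [buildAdjA_eq_foldl, adj_count_aux]; simp

lemma mem_adj (edges : List (Int × Int)) (u v : Int) :
    v ∈ (buildAdjA edges).getD u [] ↔ ((u, v) ∈ edges ∨ (v, u) ∈ edges) := by
  rw [← List.count_pos_iff, adj_count]
  constructor
  · intro h
    rcases Nat.lt_or_ge 0 (edges.count (u, v)) with h1 | h1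
    · exact Or.inl (List.count_pos_iff.mp h1)
    · right; apply List.count_pos_iff.mp; omega
  · intro h
    rcases h with h | h
    · have := List.count_pos_iff.mpr h; omega
    · have := List.count_pos_iff.mpr h; omega

-- ---------- module B : invariants of the BFS loop ----------

structure BInv (edges : List (Int × Int)) (o : List Int) (par : PySem.Dict Int Int) : Prop where
  nd : o.Nodup
  h0 : o.head? = some 0
  dom : ∀ v : Int, par.contains v = true ↔ v ∈ o
  p0 : par.get? 0 = some (-1)
  pfact : ∀ v ∈ o, v ≠ 0 →
    par.getD v 0 ∈ o ∧ o.idxOf (par.getD v 0) < o.idxOf v ∧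
      v ∈ (buildAdjA edges).getD (par.getD v 0) []
  sub : ∀ v ∈ o, v = 0 ∨ ∃ p ∈ edges, v = p.1 ∨ v = p.2

lemma BInv.zero_mem {edges o par} (h : BInv edges o par) : (0 : Int) ∈ o := by
  have := h.h0
  cases o with
  | nil => simp at this
  | cons a t => simp at this; simp [this]

def bfsF (x : Int) : List Int × PySem.Dict Int Int → Int → List Int × PySem.Dict Int Int :=
  fun s nb => if s.2.contains nb then s else (s.1 ++ [nb], s.2.insert nb x)

lemma foldStep (edges : List (Int × Int)) (x : Int) :
    ∀ (nbs : List Int) (o : List Int) (par : PySem.Dict Int Int),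
    (∀ nb ∈ nbs, nb ∈ (buildAdjA edges).getD x []) →
    BInv edges o par → x ∈ o →
    BInv edges (nbs.foldl (bfsF x) (o, par)).1 (nbs.foldl (bfsF x) (o, par)).2 ∧
    o <+: (nbs.foldl (bfsF x) (o, par)).1 ∧
    (∀ nb ∈ nbs, nb ∈ (nbs.foldl (bfsF x) (o, par)).1) := by
  intro nbs
  induction nbs with
  | nil => intro o par _ hinv _; exact ⟨hinv, List.prefix_refl _, by simp⟩
  | cons nb rest ih =>
    intro o par hnbs hinv hx
    rw [List.foldl_cons]
    by_cases hc : par.contains nb = true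
    · have hmem : nb ∈ o := (hinv.dom nb).mp hc
      have : bfsF x (o, par) nb = (o, par) := by simp [bfsF, hc]
      rw [this]
      obtain ⟨h1, h2, h3⟩ := ih o par (fun m hm => hnbs m (by simp [hm]))
        hinv hx
      exact ⟨h1, h2, fun m hm => by
        rcases List.mem_cons.mp hm with rfl | hm
        · exact h2.subset hmem
        · exact h3 m hm⟩
    · have hnb_notmem : nb ∉ o := fun h => hc ((hinv.dom nb).mpr h)
      have hstep : bfsF x (o, par) nb = (o ++ [nb], par.insert nb x) := by
        simp [bfsF, hc]
      rw [hstep]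
      have hnb_adj : nb ∈ (buildAdjA edges).getD x [] := hnbs nb (by simp)
      have h0mem : (0 : Int) ∈ o := hinv.zero_mem
      have hnb0 : nb ≠ 0 := fun h => hnb_notmem (h ▸ h0mem)
      have hinv' : BInv edges (o ++ [nb]) (par.insert nb x) := by
        refine ⟨?_, ?_, ?_, ?_, ?_, ?_⟩
        · simp only [List.nodup_append, List.nodup_singleton, true_and]
          refine ⟨hinv.nd, ?_⟩
          intro a ha b hb
          have : b = nb := by simpa using hb
          subst this
          intro h
          subst h
          exact hnb_notmem ha
        · cases o with
          | nil => exact absurd hinv.h0 (by simp)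
          | cons a t => have := hinv.h0; simp_all
        · intro v
          rw [PySem.Dict.contains_insert]
          simp only [List.mem_append, List.mem_singleton]
          constructor
          · intro h
            rcases Bool.or_eq_true_iff.mp h with h | h
            · exact Or.inr (by simpa using h)
            · exact Or.inl ((hinv.dom v).mp h)
          · intro h
            rcases h with h | h
            · exact Bool.or_eq_true_iff.mpr (Or.inr ((hinv.dom v).mpr h))
            · exact Bool.or_eq_true_iff.mpr (Or.inl (by simp [h]))
        · have h0nb : (0 : Int) ≠ nb := fun h => hnb0 h.symm
          rw [PySem.Dict.get?_insert, if_neg h0nb]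
          exact hinv.p0
        · intro v hv hv0
          rcases List.mem_append.mp hv with hvo | hvnb
          · have hvne : v ≠ nb := fun h => hnb_notmem (h ▸ hvo)
            have hgd : (par.insert nb x).getD v 0 = par.getD v 0 := by
              rw [PySem.Dict.getD_insert, if_neg hvne]
            obtain ⟨hp1, hp2, hp3⟩ := hinv.pfact v hvo hv0
            rw [hgd]
            refine ⟨List.mem_append.mpr (Or.inl hp1), ?_, hp3⟩
            rw [List.idxOf_append_of_mem hp1, List.idxOf_append_of_mem hvo]
            exact hp2
          · have hvnb' : v = nb := by simpa using hvnb
            subst hvnb'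
            have hgd : (par.insert v x).getD v 0 = x := by
              rw [PySem.Dict.getD_insert, if_pos rfl]
            rw [hgd]
            refine ⟨List.mem_append.mpr (Or.inl hx), ?_, hnb_adj⟩
            rw [List.idxOf_append_of_mem hx]
            have h1 : o.idxOf x < o.length := List.idxOf_lt_length_iff.mpr hx
            have h2 : (o ++ [v]).idxOf v = o.length := by
              rw [List.idxOf_append_of_notMem hnb_notmem]; simp
            omega
        · intro v hv
          rcases List.mem_append.mp hv with hv | hv
          · exact hinv.sub v hv
          · have : v = nb := by simpa using hv
            subst this
            rcases (mem_adj edges x v).mp hnb_adj with h | h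
            · exact Or.inr ⟨(x, v), h, Or.inr rfl⟩
            · exact Or.inr ⟨(v, x), h, Or.inl rfl⟩
      obtain ⟨h1, h2, h3⟩ := ih (o ++ [nb]) (par.insert nb x)
        (fun m hm => hnbs m (by simp [hm])) hinv' (by simp [hx])
      refine ⟨h1, (List.prefix_append o [nb]).trans h2, fun m hm => ?_⟩
      rcases List.mem_cons.mp hm with rfl | hm
      · exact h2.subset (by simp)
      · exact h3 m hm


lemma len_bound (edges : List (Int × Int)) (o : List Int) (hnd : o.Nodup)
    (hsub : ∀ v ∈ o, v = 0 ∨ ∃ p ∈ edges, v = p.1 ∨ v = p.2) :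
    o.length ≤ 2 * edges.length + 1 := by
  classical
  have hS : ∀ v ∈ o, v ∈ (0 : Int) :: edges.flatMap (fun p => [p.1, p.2]) := by
    intro v hv
    rcases hsub v hv with h | ⟨p, hp, h⟩
    · simp [h]
    · rcases h with h | h <;> subst h <;>
        exact List.mem_cons_of_mem _ (List.mem_flatMap.mpr ⟨p, hp, by simp⟩)
  have hSlen : ((0 : Int) :: edges.flatMap (fun p => [p.1, p.2])).length
      = 2 * edges.length + 1 := by
    simp only [List.length_cons, List.length_flatMap]
    induction edges with
    | nil => simp
    | cons p t ih => simp_all; omega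
  calc o.length = o.toFinset.card := (List.toFinset_card_of_nodup hnd).symm
    _ ≤ ((0 : Int) :: edges.flatMap (fun p => [p.1, p.2])).toFinset.card := by
        apply Finset.card_le_card
        intro v hv
        simp only [List.mem_toFinset] at hv ⊢
        exact hS v hv
    _ ≤ _ := by rw [← hSlen]; exact List.toFinset_card_le _

lemma bfsLoop (edges : List (Int × Int)) :
    ∀ (fuel : Nat) (o : List Int) (i : Nat) (par : PySem.Dict Int Int),
    BInv edges o par →
    (∀ j, j < i → ∀ (hj : j < o.length),
        ∀ w ∈ (buildAdjA edges).getD (o[j]'hj) [], w ∈ o) →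
    2 * edges.length + 2 ≤ fuel + i →
    BInv edges (bfsB (buildAdjA edges) fuel o i par).1 (bfsB (buildAdjA edges) fuel o i par).2 ∧
    o <+: (bfsB (buildAdjA edges) fuel o i par).1 ∧
    (∀ v ∈ (bfsB (buildAdjA edges) fuel o i par).1,
        ∀ w ∈ (buildAdjA edges).getD v [], w ∈ (bfsB (buildAdjA edges) fuel o i par).1) := by
  intro fuel
  induction fuel with
  | zero =>
    intro o i par hinv hproc hfi
    have hlen : o.length ≤ 2 * edges.length + 1 := len_bound edges o hinv.nd hinv.sub
    have hio : o.length ≤ i := by omega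
    simp only [bfsB]
    refine ⟨hinv, List.prefix_refl _, ?_⟩
    intro v hv w hw
    obtain ⟨j, hj, rfl⟩ := List.mem_iff_getElem.mp hv
    exact hproc j (by omega) hj w hw
  | succ f ih =>
    intro o i par hinv hproc hfi
    by_cases hi : i < o.length
    · have hbfs : bfsB (buildAdjA edges) (f + 1) o i par
          = bfsB (buildAdjA edges) f
              (((buildAdjA edges).getD (o.getD i 0) []).foldl (bfsF (o.getD i 0)) (o, par)).1
              (i + 1)
              (((buildAdjA edges).getD (o.getD i 0) []).foldl (bfsF (o.getD i 0)) (o, par)).2 := by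
        simp only [bfsB, if_pos hi]
        rfl
      set x := o.getD i 0 with hxdef
      have hxeq : x = o[i]'hi := by rw [hxdef]; exact List.getD_eq_getElem o 0 hi
      have hxmem : x ∈ o := by rw [hxeq]; exact List.getElem_mem hi
      obtain ⟨hinv', hpre', hall'⟩ :=
        foldStep edges x ((buildAdjA edges).getD x []) o par (fun nb h => h) hinv hxmem
      set s := ((buildAdjA edges).getD x []).foldl (bfsF x) (o, par) with hsdef
      have hproc' : ∀ j, j < i + 1 → ∀ (hj : j < s.1.length),
          ∀ w ∈ (buildAdjA edges).getD (s.1[j]'hj) [], w ∈ s.1 := by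
        intro j hj hjlen w hw
        have hjo : j < o.length := by omega
        have hgj : s.1[j]'hjlen = o[j]'hjo := (List.IsPrefix.getElem hpre' hjo).symm ▸ rfl
        by_cases hji : j < i
        · have := hproc j hji hjo w (by rw [← hgj]; exact hw)
          exact hpre'.subset this
        · have hji' : j = i := by omega
          subst hji'
          have : s.1[j]'hjlen = x := by rw [hgj, hxeq]
          rw [this] at hw
          exact hall' w hw
      obtain ⟨h1, h2, h3⟩ := ih s.1 (i + 1) s.2 hinv' hproc' (by omega)
      rw [hbfs]
      exact ⟨h1, hpre'.trans h2, h3⟩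
    · have hbfs : bfsB (buildAdjA edges) (f + 1) o i par = (o, par) := by
        simp only [bfsB, if_neg hi]
      rw [hbfs]
      refine ⟨hinv, List.prefix_refl _, ?_⟩
      intro v hv w hw
      have hv' : v ∈ o := hv
      have hii : o.length ≤ i := Nat.le_of_not_lt hi
      obtain ⟨j, hj, rfl⟩ := List.mem_iff_getElem.mp hv'
      exact hproc j (by omega) hj w hw

lemma bfs_inv (edges : List (Int × Int)) :
    BInv edges (ordE edges) (parE edges) ∧
    (∀ v ∈ ordE edges, ∀ w ∈ (buildAdjA edges).getD v [], w ∈ ordE edges) := by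
  have hinit : BInv edges [0] (PySem.Dict.empty.insert 0 (-1)) := by
    refine ⟨List.nodup_singleton _, rfl, ?_, ?_, ?_, ?_⟩
    · intro v
      rw [PySem.Dict.contains_insert]
      simp only [PySem.Dict.contains_empty, Bool.or_false, beq_iff_eq, List.mem_singleton]
    · exact PySem.Dict.get?_insert_self _ _ _
    · intro v hv hv0
      simp at hv
      exact absurd hv hv0
    · intro v hv
      simp at hv
      exact Or.inl hv
  obtain ⟨h1, _, h3⟩ := bfsLoop edges (2 * edges.length + 2) [0] 0
    (PySem.Dict.empty.insert 0 (-1)) hinit (by intro j hj; omega) (by omega)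
  exact ⟨h1, h3⟩

lemma ord_nodup (edges : List (Int × Int)) : (ordE edges).Nodup := (bfs_inv edges).1.nd

lemma ord_zero_mem (edges : List (Int × Int)) : (0 : Int) ∈ ordE edges :=
  (bfs_inv edges).1.zero_mem

lemma rnk_zero (edges : List (Int × Int)) : rnk edges 0 = 0 := by
  have h := (bfs_inv edges).1.h0
  unfold rnk
  cases hord : ordE edges with
  | nil => rw [hord] at h; simp at h
  | cons a t =>
    rw [hord] at h
    simp at h
    simp [← h, List.idxOf_cons_self]

lemma ord_pfact (edges : List (Int × Int)) :
    ∀ v ∈ ordE edges, v ≠ 0 →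
      parD edges v ∈ ordE edges ∧ rnk edges (parD edges v) < rnk edges v ∧
        v ∈ (buildAdjA edges).getD (parD edges v) [] :=
  (bfs_inv edges).1.pfact

lemma ord_closed (edges : List (Int × Int)) :
    ∀ v ∈ ordE edges, ∀ w ∈ (buildAdjA edges).getD v [], w ∈ ordE edges :=
  (bfs_inv edges).2

-- ---------- module C : counting makes every component edge a tree edge ----------

lemma ord_sub_vertF (edges : List (Int × Int)) :
    ∀ v ∈ ordE edges, v ∈ vertF edges := by
  intro v hv
  rcases (bfs_inv edges).1.sub v hv with h | ⟨p, hp, h⟩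
  · subst h; simp [vertF]
  · have : v ∈ edges.flatMap (fun p => [p.1, p.2]) :=
      List.mem_flatMap.mpr ⟨p, hp, by rcases h with h | h <;> simp [h]⟩
    simp [vertF, List.mem_toFinset.mpr this]

-- the distinct unordered edges both of whose endpoints were visited
def ordPairs (edges : List (Int × Int)) : Finset (Int × Int) :=
  ((edges.filter (fun p => decide (p.1 ∈ ordE edges ∧ p.2 ∈ ordE edges))).map
    normP).toFinset

lemma mem_ordPairs (edges : List (Int × Int)) (q : Int × Int) :
    q ∈ ordPairs edges ↔
      ∃ p ∈ edges, p.1 ∈ ordE edges ∧ p.2 ∈ ordE edges ∧ normP p = q := by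
  unfold ordPairs
  rw [List.mem_toFinset, List.mem_map]
  constructor
  · rintro ⟨p, hp, hq⟩
    rw [List.mem_filter] at hp
    have := of_decide_eq_true hp.2
    exact ⟨p, hp.1, this.1, this.2, hq⟩
  · rintro ⟨p, hp, h1, h2, hq⟩
    exact ⟨p, List.mem_filter.mpr ⟨hp, decide_eq_true ⟨h1, h2⟩⟩, hq⟩

lemma pair_eq_of_norm {a b c d : Int} (h : normP (a, b) = normP (c, d)) :
    (a = c ∧ b = d) ∨ (a = d ∧ b = c) := by
  simp only [normP, Prod.ext_iff] at h
  rcases le_total a b with h1 | h1 <;> rcases le_total c d with h2 | h2 <;>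
    simp [min_def, max_def, h1, h2] at h <;> omega

lemma normP_comm (a b : Int) : normP (a, b) = normP (b, a) := by
  simp [normP, min_comm, max_comm]

-- the visited-edges count from Pre_solve's acyclicity, specialised to the
-- visited vertex set: exactly |ordE| - 1 distinct edges lie inside it
lemma ordPairs_card (edges : List (Int × Int)) (hpre : Pre_solve edges) :
    (ordPairs edges).card + 1 = (ordE edges).toFinset.card := by
  classical
  set O : Finset Int := (ordE edges).toFinset with hO
  have hOsub : O ∈ (vertF edges).powerset := by
    rw [Finset.mem_powerset]
    intro v hv
    exact ord_sub_vertF edges v (List.mem_toFinset.mp hv)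
  have hOne : O.Nonempty := ⟨0, List.mem_toFinset.mpr (ord_zero_mem edges)⟩
  -- upper bound
  have hfilter_eq : edges.filter (fun p => decide (p.1 ∈ O ∧ p.2 ∈ O))
      = edges.filter (fun p => decide (p.1 ∈ ordE edges ∧ p.2 ∈ ordE edges)) := by
    apply List.filter_congr
    intro p _
    simp [hO, List.mem_toFinset]
  have hlt := hpre.2.2 O hOsub hOne
  rw [hfilter_eq] at hlt
  have hnodupmap : ((edges.filter (fun p => decide (p.1 ∈ ordE edges ∧ p.2 ∈ ordE edges))).map
      normP).Nodup := by
    have hsub : (edges.filter (fun p => decide (p.1 ∈ ordE edges ∧ p.2 ∈ ordE edges))).Sublist edges :=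
      List.filter_sublist
    exact (hsub.map normP).nodup hpre.2.1
  have hcard_eq : (ordPairs edges).card
      = (edges.filter (fun p => decide (p.1 ∈ ordE edges ∧ p.2 ∈ ordE edges))).length := by
    unfold ordPairs
    rw [List.toFinset_card_of_nodup hnodupmap, List.length_map]
  have hupper : (ordPairs edges).card + 1 ≤ O.card := by omega
  -- lower bound: v ↦ normP (v, parD v) is injective from O.erase 0 into ordPairs
  have hmaps : ∀ v ∈ O.erase 0, normP (v, parD edges v) ∈ ordPairs edges := by
    intro v hv
    have hv0 : v ≠ 0 := (Finset.mem_erase.mp hv).1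
    have hvord : v ∈ ordE edges := List.mem_toFinset.mp (Finset.mem_erase.mp hv).2
    obtain ⟨hp1, _, hp3⟩ := ord_pfact edges v hvord hv0
    rcases (mem_adj edges (parD edges v) v).mp hp3 with h | h
    · rw [mem_ordPairs]
      exact ⟨(parD edges v, v), h, hp1, hvord, normP_comm _ _⟩
    · rw [mem_ordPairs]
      exact ⟨(v, parD edges v), h, hvord, hp1, rfl⟩
  have hinj : Set.InjOn (fun v => normP (v, parD edges v)) (O.erase 0 : Finset Int) := by
    intro u hu v hv huv
    simp only [Finset.coe_erase, Set.mem_diff, Finset.mem_coe, Set.mem_singleton_iff] at hu hv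
    have hu0 : u ≠ 0 := hu.2
    have hv0 : v ≠ 0 := hv.2
    have huord : u ∈ ordE edges := List.mem_toFinset.mp hu.1
    have hvord : v ∈ ordE edges := List.mem_toFinset.mp hv.1
    rcases pair_eq_of_norm huv with ⟨h1, _⟩ | ⟨h1, h2⟩
    · exact h1
    · exfalso
      obtain ⟨_, hru, _⟩ := ord_pfact edges u huord hu0
      obtain ⟨_, hrv, _⟩ := ord_pfact edges v hvord hv0
      rw [h2] at hru
      rw [← h1] at hrv
      omega
  have hlower : (O.erase 0).card ≤ (ordPairs edges).card :=
    Finset.card_le_card_of_injOn _ hmaps hinj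
  have herase : (O.erase 0).card = O.card - 1 :=
    Finset.card_erase_of_mem (List.mem_toFinset.mpr (ord_zero_mem edges))
  have hO1 : 1 ≤ O.card := Finset.card_pos.mpr hOne
  omega

-- every distinct visited edge is some vertex's BFS parent edge (the counting bijection)
lemma parent_surj (edges : List (Int × Int)) (hpre : Pre_solve edges) :
    ∀ q ∈ ordPairs edges, ∃ v ∈ (ordE edges).toFinset.erase 0,
      normP (v, parD edges v) = q := by
  have hmaps : ∀ v ∈ (ordE edges).toFinset.erase 0,
      normP (v, parD edges v) ∈ ordPairs edges := by
    intro v hv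
    have hv0 : v ≠ 0 := (Finset.mem_erase.mp hv).1
    have hvord : v ∈ ordE edges := List.mem_toFinset.mp (Finset.mem_erase.mp hv).2
    obtain ⟨hp1, _, hp3⟩ := ord_pfact edges v hvord hv0
    rcases (mem_adj edges (parD edges v) v).mp hp3 with h | h
    · rw [mem_ordPairs]
      exact ⟨(parD edges v, v), h, hp1, hvord, normP_comm _ _⟩
    · rw [mem_ordPairs]
      exact ⟨(v, parD edges v), h, hvord, hp1, rfl⟩
  have hinj : Set.InjOn (fun v => normP (v, parD edges v))
      ((ordE edges).toFinset.erase 0 : Finset Int) := by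
    intro u hu v hv huv
    simp only [Finset.coe_erase, Set.mem_diff, Finset.mem_coe, List.mem_toFinset] at hu hv
    have hu0 : u ≠ 0 := by simpa using hu.2
    have hv0 : v ≠ 0 := by simpa using hv.2
    have huord := hu.1
    have hvord := hv.1
    rcases pair_eq_of_norm huv with ⟨h1, h2⟩ | ⟨h1, h2⟩
    · exact h1
    · exfalso
      obtain ⟨_, hru, _⟩ := ord_pfact edges u huord hu0
      obtain ⟨_, hrv, _⟩ := ord_pfact edges v hvord hv0
      rw [h2] at hru
      rw [← h1] at hrv
      omega
  have hcard : (ordPairs edges).card ≤ ((ordE edges).toFinset.erase 0).card := by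
    have h1 : ((ordE edges).toFinset.erase 0).card = (ordE edges).toFinset.card - 1 :=
      Finset.card_erase_of_mem (List.mem_toFinset.mpr (ord_zero_mem edges))
    have h2 := ordPairs_card edges hpre
    omega
  intro q hq
  have := Finset.surjOn_of_injOn_of_card_le (s := (ordE edges).toFinset.erase 0)
    (t := ordPairs edges) (fun v => normP (v, parD edges v))
    (fun a ha => hmaps a ha) hinj hcard
  have hmem := this (Finset.mem_coe.mpr hq)
  rcases Set.mem_image _ _ _ |>.mp hmem with ⟨v, hv, hveq⟩
  exact ⟨v, Finset.mem_coe.mp hv, hveq⟩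

lemma tree_edge (edges : List (Int × Int)) (hpre : Pre_solve edges) :
    ∀ p ∈ edges, (p.1 ∈ ordE edges ∨ p.2 ∈ ordE edges) →
      p.1 ∈ ordE edges ∧ p.2 ∈ ordE edges ∧ p.1 ≠ p.2 ∧
        (p.2 = parD edges p.1 ∨ p.1 = parD edges p.2) := by
  intro p hp hincident
  have hne : p.1 ≠ p.2 := hpre.1 p hp
  have hboth : p.1 ∈ ordE edges ∧ p.2 ∈ ordE edges := by
    rcases hincident with h | h
    · refine ⟨h, ?_⟩
      apply ord_closed edges p.1 h
      rw [mem_adj]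
      exact Or.inl hp
    · refine ⟨?_, h⟩
      apply ord_closed edges p.2 h
      rw [mem_adj]
      exact Or.inr hp
  have hsurj := parent_surj edges hpre
  have hq : normP p ∈ ordPairs edges := by
    rw [mem_ordPairs]
    exact ⟨p, hp, hboth.1, hboth.2, rfl⟩
  obtain ⟨v, hv, hveq⟩ := hsurj (normP p) hq
  refine ⟨hboth.1, hboth.2, hne, ?_⟩
  have hpp : normP (v, parD edges v) = normP (p.1, p.2) := by
    rcases p with ⟨a, b⟩
    exact hveq
  rcases pair_eq_of_norm hpp with ⟨h1, h2⟩ | ⟨h1, h2⟩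
  · left; rw [← h1, ← h2]
  · right; rw [← h1, ← h2]

-- ---------- module E : children, subtree sizes, descendants, ancestor chains ----------

def childrenE (edges : List (Int × Int)) (x : Int) : List Int :=
  (ordE edges).filter (fun m => decide (m ≠ 0) && decide (parD edges m = x))

lemma mem_childrenE (edges : List (Int × Int)) (x m : Int) :
    m ∈ childrenE edges x ↔ m ∈ ordE edges ∧ m ≠ 0 ∧ parD edges m = x := by
  unfold childrenE
  rw [List.mem_filter]
  simp

lemma rnk_lt_len (edges : List (Int × Int)) (v : Int) (h : v ∈ ordE edges) :
    rnk edges v < (ordE edges).length := List.idxOf_lt_length_iff.mpr h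

lemma rnk_pos (edges : List (Int × Int)) (v : Int) (h : v ∈ ordE edges) (h0 : v ≠ 0) :
    1 ≤ rnk edges v := by
  rcases Nat.eq_zero_or_pos (rnk edges v) with hz | hp
  · exfalso
    have hne : ordE edges ≠ [] := List.ne_nil_of_mem h
    have hhead : (ordE edges).head hne = v := (List.idxOf_eq_zero_iff_head_eq hne).mp hz
    have hh := (bfs_inv edges).1.h0
    rw [List.head?_eq_head hne] at hh
    injection hh with hh
    exact h0 (by rw [← hhead, hh])
  · exact hp

lemma child_rnk (edges : List (Int × Int)) (x m : Int) (hm : m ∈ childrenE edges x) :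
    x ∈ ordE edges ∧ rnk edges x < rnk edges m := by
  obtain ⟨h1, h2, h3⟩ := (mem_childrenE edges x m).mp hm
  obtain ⟨hp1, hp2, _⟩ := ord_pfact edges m h1 h2
  rw [h3] at hp1 hp2
  exact ⟨hp1, hp2⟩

def szW (edges : List (Int × Int)) : Nat → Int → Int
  | 0, _ => 1
  | Nat.succ f, x => 1 + ((childrenE edges x).map (szW edges f)).sum

lemma szW_stab (edges : List (Int × Int)) :
    ∀ (k : Nat) (x : Int), x ∈ ordE edges → (ordE edges).length - rnk edges x ≤ k →
    ∀ f g, (ordE edges).length - rnk edges x ≤ f → (ordE edges).length - rnk edges x ≤ g →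
      szW edges f x = szW edges g x := by
  intro k
  induction k using Nat.strong_induction_on with
  | _ k ih =>
    intro x hx hk f g hf hg
    have hlen : rnk edges x < (ordE edges).length := rnk_lt_len edges x hx
    rcases f with _ | f'
    · omega
    rcases g with _ | g'
    · omega
    show 1 + ((childrenE edges x).map (szW edges f')).sum
        = 1 + ((childrenE edges x).map (szW edges g')).sum
    have hmap : (childrenE edges x).map (szW edges f')
        = (childrenE edges x).map (szW edges g') := by
      apply List.map_congr_left
      intro m hm
      obtain ⟨hmo, _, _⟩ := (mem_childrenE edges x m).mp hm
      obtain ⟨_, hrm⟩ := child_rnk edges x m hm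
      have hmlt : rnk edges m < (ordE edges).length := rnk_lt_len edges m hmo
      exact ih ((ordE edges).length - rnk edges m) (by omega) m hmo (by omega)
        f' g' (by omega) (by omega)
    rw [hmap]

def szE (edges : List (Int × Int)) (x : Int) : Int := szW edges (ordE edges).length x

lemma szW_pos (edges : List (Int × Int)) : ∀ f x, 1 ≤ szW edges f x := by
  intro f
  induction f with
  | zero => intro x; simp [szW]
  | succ g ih =>
    intro x
    show 1 ≤ 1 + ((childrenE edges x).map (szW edges g)).sum
    have : 0 ≤ ((childrenE edges x).map (szW edges g)).sum := by
      apply List.sum_nonneg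
      intro a ha
      rcases List.mem_map.mp ha with ⟨m, _, rfl⟩
      have := ih m
      omega
    omega

lemma szE_unfold (edges : List (Int × Int)) (x : Int) (hx : x ∈ ordE edges) :
    szE edges x = 1 + ((childrenE edges x).map (szE edges)).sum := by
  have hlen : rnk edges x < (ordE edges).length := rnk_lt_len edges x hx
  unfold szE
  rcases hL : (ordE edges).length with _ | L'
  · omega
  show 1 + ((childrenE edges x).map (szW edges L')).sum
      = 1 + ((childrenE edges x).map (szW edges (L' + 1))).sum
  have hmap : (childrenE edges x).map (szW edges L')
      = (childrenE edges x).map (szW edges (L' + 1)) := by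
    apply List.map_congr_left
    intro m hm
    obtain ⟨hmo, hm0, _⟩ := (mem_childrenE edges x m).mp hm
    have hmlt : rnk edges m < (ordE edges).length := rnk_lt_len edges m hmo
    have hm1 : 1 ≤ rnk edges m := rnk_pos edges m hmo hm0
    exact szW_stab edges ((ordE edges).length - rnk edges m) m hmo (by omega)
      L' (L' + 1) (by omega) (by omega)
  rw [hmap]

def descW (edges : List (Int × Int)) : Nat → Int → List Int
  | 0, x => [x]
  | Nat.succ f, x => x :: (childrenE edges x).flatMap (descW edges f)

lemma desc_self (edges : List (Int × Int)) (f : Nat) (x : Int) : x ∈ descW edges f x := by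
  cases f <;> simp [descW]

lemma desc_ord (edges : List (Int × Int)) :
    ∀ (f : Nat) (x : Int), x ∈ ordE edges → ∀ v ∈ descW edges f x, v ∈ ordE edges := by
  intro f
  induction f with
  | zero => intro x hx v hv; simp [descW] at hv; subst hv; exact hx
  | succ g ih =>
    intro x hx v hv
    rcases List.mem_cons.mp hv with rfl | hv
    · exact hx
    · rcases List.mem_flatMap.mp hv with ⟨m, hm, hvm⟩
      exact ih m ((mem_childrenE edges x m).mp hm).1 v hvm

lemma desc_step (edges : List (Int × Int)) :
    ∀ (f : Nat) (x u m : Int), u ∈ descW edges f x → m ∈ childrenE edges u →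
      m ∈ descW edges (f + 1) x := by
  intro f
  induction f with
  | zero =>
    intro x u m hu hm
    simp [descW] at hu
    subst hu
    exact List.mem_cons_of_mem _ (List.mem_flatMap.mpr ⟨m, hm, by simp [descW]⟩)
  | succ g ih =>
    intro x u m hu hm
    rcases List.mem_cons.mp hu with rfl | hu
    · exact List.mem_cons_of_mem _
        (List.mem_flatMap.mpr ⟨m, hm, desc_self edges _ m⟩)
    · rcases List.mem_flatMap.mp hu with ⟨m', hm', hum'⟩
      exact List.mem_cons_of_mem _
        (List.mem_flatMap.mpr ⟨m', hm', ih m' u m hum' hm⟩)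

lemma desc_stab (edges : List (Int × Int)) :
    ∀ (k : Nat) (x : Int), x ∈ ordE edges → (ordE edges).length - rnk edges x ≤ k →
    ∀ f g v, (ordE edges).length - rnk edges x ≤ f → (ordE edges).length - rnk edges x ≤ g →
      (v ∈ descW edges f x ↔ v ∈ descW edges g x) := by
  intro k
  induction k using Nat.strong_induction_on with
  | _ k ih =>
    intro x hx hk f g v hf hg
    have hlen : rnk edges x < (ordE edges).length := rnk_lt_len edges x hx
    rcases f with _ | f'
    · omega
    rcases g with _ | g'
    · omega
    show v ∈ x :: (childrenE edges x).flatMap (descW edges f')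
        ↔ v ∈ x :: (childrenE edges x).flatMap (descW edges g')
    simp only [List.mem_cons, List.mem_flatMap]
    constructor
    · rintro (rfl | ⟨m, hm, hvm⟩)
      · exact Or.inl rfl
      · refine Or.inr ⟨m, hm, ?_⟩
        obtain ⟨hmo, _, _⟩ := (mem_childrenE edges x m).mp hm
        obtain ⟨_, hrm⟩ := child_rnk edges x m hm
        have hmlt : rnk edges m < (ordE edges).length := rnk_lt_len edges m hmo
        exact (ih ((ordE edges).length - rnk edges m) (by omega) m hmo (by omega)
          f' g' v (by omega) (by omega)).mp hvm
    · rintro (rfl | ⟨m, hm, hvm⟩)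
      · exact Or.inl rfl
      · refine Or.inr ⟨m, hm, ?_⟩
        obtain ⟨hmo, _, _⟩ := (mem_childrenE edges x m).mp hm
        obtain ⟨_, hrm⟩ := child_rnk edges x m hm
        have hmlt : rnk edges m < (ordE edges).length := rnk_lt_len edges m hmo
        exact (ih ((ordE edges).length - rnk edges m) (by omega) m hmo (by omega)
          f' g' v (by omega) (by omega)).mpr hvm

def descE (edges : List (Int × Int)) (x : Int) : List Int :=
  descW edges (ordE edges).length x

lemma descE_iff (edges : List (Int × Int)) (x : Int) (hx : x ∈ ordE edges) (k : Int) :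
    k ∈ descE edges x ↔ k = x ∨ ∃ m ∈ childrenE edges x, k ∈ descE edges m := by
  have hlen : rnk edges x < (ordE edges).length := rnk_lt_len edges x hx
  constructor
  · intro hk
    unfold descE at hk
    rcases hL : (ordE edges).length with _ | L'
    · omega
    rw [hL] at hk
    rcases List.mem_cons.mp hk with rfl | hk
    · exact Or.inl rfl
    · rcases List.mem_flatMap.mp hk with ⟨m, hm, hkm⟩
      refine Or.inr ⟨m, hm, ?_⟩
      obtain ⟨hmo, hm0, _⟩ := (mem_childrenE edges x m).mp hm
      have hmlt : rnk edges m < (ordE edges).length := rnk_lt_len edges m hmo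
      have hm1 : 1 ≤ rnk edges m := rnk_pos edges m hmo hm0
      unfold descE
      exact (desc_stab edges ((ordE edges).length - rnk edges m) m hmo (by omega)
        L' (ordE edges).length k (by omega) (by omega)).mp hkm
  · intro hk
    rcases hk with rfl | ⟨m, hm, hkm⟩
    · exact desc_self edges _ k
    · have hkx : k ∈ descW edges ((ordE edges).length + 1) x := by
        have hkm' : k ∈ descW edges (ordE edges).length m := hkm
        exact List.mem_cons_of_mem _ (List.mem_flatMap.mpr ⟨m, hm, hkm'⟩)
      unfold descE
      exact (desc_stab edges ((ordE edges).length - rnk edges x) x hx (by omega)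
        ((ordE edges).length + 1) (ordE edges).length k (by omega) (by omega)).mp hkx

lemma ord_sub_desc0 (edges : List (Int × Int)) :
    ∀ v ∈ ordE edges, v ∈ descE edges 0 := by
  have key : ∀ n, ∀ v ∈ ordE edges, rnk edges v = n → v ∈ descE edges 0 := by
    intro n
    induction n using Nat.strong_induction_on with
    | _ n ih =>
      intro v hv hr
      by_cases hv0 : v = 0
      · subst hv0
        exact desc_self edges _ 0
      · obtain ⟨hp1, hp2, _⟩ := ord_pfact edges v hv hv0
        have hpar : parD edges v ∈ descE edges 0 := by
          subst hr
          exact ih (rnk edges (parD edges v)) hp2 _ hp1 rfl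
        have hvchild : v ∈ childrenE edges (parD edges v) :=
          (mem_childrenE edges _ v).mpr ⟨hv, hv0, rfl⟩
        have := desc_step edges (ordE edges).length 0 (parD edges v) v hpar hvchild
        unfold descE
        exact (desc_stab edges (ordE edges).length 0 (ord_zero_mem edges)
          (by rw [rnk_zero]; omega) ((ordE edges).length + 1) (ordE edges).length v
          (by rw [rnk_zero]; omega) (by rw [rnk_zero]; omega)).mp this
  intro v hv
  exact key (rnk edges v) v hv rfl

lemma descE_sub_ord (edges : List (Int × Int)) (x : Int) (hx : x ∈ ordE edges) :
    ∀ v ∈ descE edges x, v ∈ ordE edges := desc_ord edges _ x hx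

-- ---------- module F : the reverse pass of B computes subtree sizes ----------

def cnt0E (edges : List (Int × Int)) : PySem.Dict Int Int :=
  (ordE edges).foldl (fun c x => c.insert x 1) PySem.Dict.empty

def revStep (edges : List (Int × Int)) (c : PySem.Dict Int Int) (x : Int) :
    PySem.Dict Int Int :=
  if x = 0 then c
  else c.insert (parD edges x) (c.getD (parD edges x) 0 + c.getD x 0)

def cntBE (edges : List (Int × Int)) : PySem.Dict Int Int :=
  (ordE edges).reverse.foldl (revStep edges) (cnt0E edges)

lemma cnt0_getD_aux (l : List Int) :
    ∀ (d : PySem.Dict Int Int) (v : Int),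
      (l.foldl (fun c x => c.insert x 1) d).getD v 0
        = if v ∈ l then 1 else d.getD v 0 := by
  induction l with
  | nil => intro d v; simp
  | cons a t ih =>
    intro d v
    rw [List.foldl_cons, ih]
    by_cases hv : v ∈ t
    · simp [hv]
    · by_cases hva : v = a
      · subst hva
        simp [hv, PySem.Dict.getD_insert]
      · simp [hv, hva, PySem.Dict.getD_insert]

lemma cnt0_getD (edges : List (Int × Int)) (v : Int) :
    (cnt0E edges).getD v 0 = if v ∈ ordE edges then 1 else 0 := by
  unfold cnt0E
  rw [cnt0_getD_aux]
  split_ifs <;> simp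

lemma nodup_perm_of_mem_iff {l1 l2 : List Int} (h1 : l1.Nodup) (h2 : l2.Nodup)
    (h : ∀ x, x ∈ l1 ↔ x ∈ l2) : l1.Perm l2 := by
  rw [List.perm_iff_count]
  intro a
  by_cases ha : a ∈ l1
  · rw [List.count_eq_one_of_mem h1 ha, List.count_eq_one_of_mem h2 ((h a).mp ha)]
  · rw [List.count_eq_zero_of_not_mem ha,
      List.count_eq_zero_of_not_mem (fun hc => ha ((h a).mpr hc))]

lemma split_idx {o : List Int} (hnd : o.Nodup) {A B : List Int} {u : Int}
    (h : o = A ++ u :: B) : o.idxOf u = A.length := by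
  subst h
  have hu : u ∉ A := by
    intro hc
    rw [List.nodup_append] at hnd
    exact hnd.2.2 _ hc _ (by simp) rfl
  rw [List.idxOf_append_of_notMem hu]
  simp

lemma split_mem {o : List Int} (hnd : o.Nodup) {A B : List Int} {u : Int}
    (h : o = A ++ u :: B) :
    ∀ w, w ∈ B ↔ (w ∈ o ∧ o.idxOf u < o.idxOf w) := by
  have hidx := split_idx hnd h
  subst h
  intro w
  rw [List.nodup_append] at hnd
  constructor
  · intro hw
    have hwA : w ∉ A := fun hc => hnd.2.2 _ hc _ (by simp [hw]) rfl
    have hwu : w ≠ u := by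
      intro hc
      subst hc
      rcases List.nodup_cons.mp hnd.2.1 with ⟨hnotin, _⟩
      exact hnotin hw
    constructor
    · simp [hw]
    · rw [hidx, List.idxOf_append_of_notMem hwA]
      have : (u :: B).idxOf w = B.idxOf w + 1 := by
        rw [List.idxOf_cons_ne _ (Ne.symm hwu)]
      omega
  · rintro ⟨hw, hlt⟩
    rw [hidx] at hlt
    rcases List.mem_append.mp hw with hwA | hwB
    · exfalso
      rw [List.idxOf_append_of_mem hwA] at hlt
      have := List.idxOf_lt_length_iff.mpr hwA
      omega
    · rcases List.mem_cons.mp hwB with rfl | hwB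
      · exfalso
        have hwA : w ∉ A := fun hc => hnd.2.2 _ hc _ (by simp) rfl
        rw [List.idxOf_append_of_notMem hwA] at hlt
        simp at hlt
      · exact hwB

lemma childf_mem (edges : List (Int × Int)) (v u : Int) (l : List Int) :
    u ∈ l.filter (fun u => decide (u ≠ 0) && decide (parD edges u = v))
      ↔ u ∈ l ∧ u ≠ 0 ∧ parD edges u = v := by
  rw [List.mem_filter]
  simp

lemma revpass (edges : List (Int × Int)) :
    ∀ (done todo : List Int), (ordE edges).reverse = done ++ todo →
      ∀ v, ((done.foldl (revStep edges) (cnt0E edges))).getD v 0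
        = (if v ∈ ordE edges then 1 else 0)
          + ((done.filter (fun u => decide (u ≠ 0) && decide (parD edges u = v))).map
              (szE edges)).sum := by
  intro done
  induction done using List.reverseRecOn with
  | nil =>
    intro todo h v
    rw [List.foldl_nil, cnt0_getD]
    simp
  | append_singleton done u ih =>
    intro todo h v
    have hrev : (ordE edges).reverse = done ++ (u :: todo) := by
      rw [h]; simp
    have hnd : ((ordE edges).reverse).Nodup := List.nodup_reverse.mpr (ord_nodup edges)
    have hnd' : (ordE edges).Nodup := ord_nodup edges
    have hu_ord : u ∈ ordE edges := by
      have : u ∈ (ordE edges).reverse := by rw [hrev]; simp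
      exact List.mem_reverse.mp this
    have hdone_mem : ∀ w, w ∈ done ↔ (w ∈ ordE edges ∧ rnk edges u < rnk edges w) := by
      intro w
      have hsplit : ordE edges = todo.reverse ++ u :: done.reverse := by
        have := congrArg List.reverse hrev
        simpa using this
      have hmem := split_mem hnd' hsplit w
      constructor
      · intro hw
        have : w ∈ done.reverse := List.mem_reverse.mpr hw
        exact hmem.mp this
      · intro hw
        exact List.mem_reverse.mp (hmem.mpr hw)
    rw [List.foldl_append, List.foldl_cons, List.foldl_nil]
    have ihv := ih (u :: todo) hrev
    by_cases hu0 : u = 0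
    · subst hu0
      rw [show revStep edges (List.foldl (revStep edges) (cnt0E edges) done) 0
          = List.foldl (revStep edges) (cnt0E edges) done from by simp [revStep]]
      rw [ihv v]
      congr 2
      rw [List.filter_append]
      have h0f : [(0 : Int)].filter (fun w => decide (w ≠ 0) && decide (parD edges w = v)) = [] := by
        simp
      rw [h0f, List.append_nil]
    · have hchild_sub : ∀ m, m ∈ childrenE edges u ↔
          m ∈ done.filter (fun w => decide (w ≠ 0) && decide (parD edges w = u)) := by
        intro m
        rw [childf_mem, mem_childrenE]
        constructor
        · rintro ⟨h1, h2, h3⟩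
          have hr := (child_rnk edges u m ((mem_childrenE edges u m).mpr ⟨h1, h2, h3⟩)).2
          exact ⟨(hdone_mem m).mpr ⟨h1, hr⟩, h2, h3⟩
        · rintro ⟨h1, h2, h3⟩
          exact ⟨((hdone_mem m).mp h1).1, h2, h3⟩
      have hperm : (done.filter (fun w => decide (w ≠ 0) && decide (parD edges w = u))).Perm
          (childrenE edges u) := by
        apply nodup_perm_of_mem_iff
        · exact List.Nodup.filter _ (by
            have : done.Nodup := by
              have : (done ++ (u :: todo)).Nodup := by rw [← hrev]; exact hnd
              exact (List.nodup_append.mp this).1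
            exact this)
        · exact List.Nodup.filter _ hnd'
        · intro x
          exact (hchild_sub x).symm
      have hcu : (List.foldl (revStep edges) (cnt0E edges) done).getD u 0 = szE edges u := by
        rw [ihv u, if_pos hu_ord]
        rw [szE_unfold edges u hu_ord]
        congr 1
        exact ((hperm.map (szE edges)).sum_eq)
      have hp := parD edges u
      rw [show revStep edges (List.foldl (revStep edges) (cnt0E edges) done) u
          = (List.foldl (revStep edges) (cnt0E edges) done).insert (parD edges u)
              ((List.foldl (revStep edges) (cnt0E edges) done).getD (parD edges u) 0
                + (List.foldl (revStep edges) (cnt0E edges) done).getD u 0)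
          from by simp [revStep, hu0]]
      rw [PySem.Dict.getD_insert]
      by_cases hvp : v = parD edges u
      · rw [if_pos hvp, hcu, ihv (parD edges u), ← hvp]
        rw [List.filter_append]
        rw [List.map_append, List.sum_append]
        have : (([u].filter (fun w => decide (w ≠ 0) && decide (parD edges w = v))).map
            (szE edges)).sum = szE edges u := by
          have : [u].filter (fun w => decide (w ≠ 0) && decide (parD edges w = v)) = [u] := by
            rw [List.filter_singleton]
            simp [hu0, hvp.symm]
          rw [this]
          simp
        rw [this]
        ring
      · rw [if_neg hvp, ihv v]
        congr 2
        rw [List.filter_append]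
        have hpar_ne : parD edges u ≠ v := fun hc => hvp hc.symm
        have : [u].filter (fun w => decide (w ≠ 0) && decide (parD edges w = v)) = [] := by
          simp [List.filter_singleton, hpar_ne]
        rw [this, List.append_nil]

lemma cntB_getD (edges : List (Int × Int)) (v : Int) :
    (cntBE edges).getD v 0 = if v ∈ ordE edges then szE edges v else 0 := by
  unfold cntBE
  rw [revpass edges (ordE edges).reverse [] (by simp) v]
  by_cases hv : v ∈ ordE edges
  · rw [if_pos hv, if_pos hv, szE_unfold edges v hv]
    congr 1
    have hperm : ((ordE edges).reverse.filter
        (fun u => decide (u ≠ 0) && decide (parD edges u = v))).Perm (childrenE edges v) := by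
      apply nodup_perm_of_mem_iff
      · exact List.Nodup.filter _ (List.nodup_reverse.mpr (ord_nodup edges))
      · exact List.Nodup.filter _ (ord_nodup edges)
      · intro x
        rw [childf_mem, mem_childrenE, List.mem_reverse]
    exact (hperm.map (szE edges)).sum_eq
  · rw [if_neg hv, if_neg hv]
    have : (ordE edges).reverse.filter
        (fun u => decide (u ≠ 0) && decide (parD edges u = v)) = [] := by
      rw [List.filter_eq_nil_iff]
      intro u hu
      simp only [Bool.and_eq_true, decide_eq_true_eq, not_and]
      intro hu0 hc
      apply hv
      rw [← hc]
      exact (ord_pfact edges u (List.mem_reverse.mp hu) hu0).1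
    rw [this]
    simp

-- ---------- module H : A's recursive dfs computes the same subtree sizes ----------

lemma parD_zero (edges : List (Int × Int)) : parD edges 0 = -1 := by
  unfold parD
  rw [PySem.Dict.getD_eq_get?_getD, (bfs_inv edges).1.p0]
  rfl

lemma ord_len_bound (edges : List (Int × Int)) :
    (ordE edges).length ≤ 2 * edges.length + 1 :=
  len_bound edges _ (ord_nodup edges) (bfs_inv edges).1.sub

lemma no_sentinel_child (edges : List (Int × Int)) (hnd : ¬ D_solve edges) (x nb : Int)
    (hx : x ∈ ordE edges) (hedge : (x, nb) ∈ edges ∨ (nb, x) ∈ edges)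
    (hpar : x = parD edges nb) (hnb : nb ∈ ordE edges) : nb ≠ 0 := by
  intro hnb0
  subst hnb0
  rw [parD_zero edges] at hpar
  subst hpar
  apply hnd
  rcases hedge with h | h
  · exact Or.inr h
  · exact Or.inl h

lemma count_map_eq_countP (f : Int × Int → Int × Int) (l : List (Int × Int))
    (z : Int × Int) : (l.map f).count z = l.countP (fun x => decide (f x = z)) := by
  induction l with
  | nil => simp
  | cons a t ih =>
    rw [List.map_cons, List.count_cons, List.countP_cons, ih]
    by_cases h : f a = z
    · simp [h]
    · simp [h]

lemma countP_ge_two_counts (l : List (Int × Int)) (p : Int × Int → Bool)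
    (a b : Int × Int) (hab : a ≠ b) (ha : p a = true) (hb : p b = true) :
    l.count a + l.count b ≤ l.countP p := by
  induction l with
  | nil => simp
  | cons x t ih =>
    simp only [List.count_cons, List.countP_cons, beq_iff_eq]
    by_cases hpx : p x = true
    · rw [if_pos hpx]
      by_cases h1 : x = a
      · have h2 : ¬ x = b := fun h => hab ((h1.symm).trans h)
        rw [if_pos h1, if_neg h2]; omega
      · by_cases h2 : x = b
        · rw [if_neg h1, if_pos h2]; omega
        · rw [if_neg h1, if_neg h2]; omega
    · have h1 : ¬ x = a := fun h => hpx (h.symm ▸ ha)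
      have h2 : ¬ x = b := fun h => hpx (h.symm ▸ hb)
      rw [if_neg h1, if_neg h2, if_neg hpx]; omega

-- under Pre_solve a neighbour list contains each vertex at most once
lemma nbs_count_le_one (edges : List (Int × Int)) (hpre : Pre_solve edges) (x : Int) :
    ∀ v, ((buildAdjA edges).getD x []).count v ≤ 1 := by
  intro v
  rw [adj_count]
  by_cases hxv : x = v
  · subst hxv
    have : edges.count (x, x) = 0 := by
      rw [List.count_eq_zero]
      intro hc
      exact hpre.1 (x, x) hc rfl
    omega
  · by_contra hc
    push_neg at hc
    have h2 : 2 ≤ edges.count (x, v) + edges.count (v, x) := hc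
    have hne : ((x, v) : Int × Int) ≠ (v, x) := by
      simp [Prod.ext_iff]
      intro h; exact absurd h hxv
    have hz : normP (x, v) = normP (v, x) := normP_comm x v
    have hle : edges.count (x, v) + edges.count (v, x)
        ≤ (edges.map normP).count (normP (x, v)) := by
      rw [count_map_eq_countP]
      exact countP_ge_two_counts edges _ (x, v) (v, x) hne
        (by simp) (by simp [hz])
    have hnd := List.nodup_iff_count_le_one.mp hpre.2.1 (normP (x, v))
    omega

lemma nbs_char (edges : List (Int × Int)) (hpre : Pre_solve edges) (hnd : ¬ D_solve edges)
    (x : Int) (hx : x ∈ ordE edges) :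
    ((buildAdjA edges).getD x []).Nodup ∧
    (∀ nb ∈ (buildAdjA edges).getD x [], nb = parD edges x ∨ nb ∈ childrenE edges x) ∧
    (∀ m ∈ childrenE edges x, m ∈ (buildAdjA edges).getD x []) ∧
    parD edges x ∉ childrenE edges x := by
  refine ⟨?_, ?_, ?_, ?_⟩
  · rw [List.nodup_iff_count_le_one]
    exact nbs_count_le_one edges hpre x
  · intro nb hnb
    rcases (mem_adj edges x nb).mp hnb with hedge | hedge
    · obtain ⟨ho1, ho2, hne, htree⟩ := tree_edge edges hpre (x, nb) hedge (Or.inl hx)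
      rcases htree with h | h
      · exact Or.inl h
      · right
        rw [mem_childrenE]
        exact ⟨ho2, no_sentinel_child edges hnd x nb hx (Or.inl hedge) h ho2, h.symm⟩
    · obtain ⟨ho1, ho2, hne, htree⟩ := tree_edge edges hpre (nb, x) hedge (Or.inr hx)
      rcases htree with h | h
      · right
        rw [mem_childrenE]
        exact ⟨ho1, no_sentinel_child edges hnd x nb hx (Or.inr hedge) h ho1, h.symm⟩
      · exact Or.inl h
  · intro m hm
    obtain ⟨h1, h2, h3⟩ := (mem_childrenE edges x m).mp hm
    obtain ⟨_, _, hadj⟩ := ord_pfact edges m h1 h2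
    rw [h3] at hadj
    exact hadj
  · intro hc
    obtain ⟨h1, h2, h3⟩ := (mem_childrenE edges x (parD edges x)).mp hc
    by_cases hx0 : x = 0
    · subst hx0
      obtain ⟨_, _, hadj⟩ := ord_pfact edges (parD edges 0) h1 h2
      rw [h3] at hadj
      apply hnd
      rw [parD_zero edges] at hadj
      rcases (mem_adj edges 0 (-1)).mp hadj with h | h
      · exact Or.inl h
      · exact Or.inr h
    · obtain ⟨_, hr, _⟩ := ord_pfact edges x hx hx0
      have hr2 := (child_rnk edges x (parD edges x) hc).2
      omega

def stValE (edges : List (Int × Int)) (x : Int) (c : PySem.Dict Int Int)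
    (procd : List Int) (k : Int) : Int :=
  if k = x then 1 + ((procd.map (szE edges)).sum)
  else if k ∈ procd.flatMap (descE edges) then szE edges k
  else c.getD k 0

def dfsStep (edges : List (Int × Int)) (f : Nat) (x p : Int) :
    Option (PySem.Dict Int Int) → Int → Option (PySem.Dict Int Int) :=
  fun acc nb =>
    match acc with
    | none => none
    | some cc =>
      if nb = p then some cc
      else
        match dfsA (buildAdjA edges) f nb x cc with
        | none => none
        | some (cc', rr) => some (cc'.insert x (cc.getD x 0 + rr))

lemma dfsA_succ (edges : List (Int × Int)) (f : Nat) (x p : Int) (c : PySem.Dict Int Int) :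
    dfsA (buildAdjA edges) (f + 1) x p c
      = match ((buildAdjA edges).getD x []).foldl (dfsStep edges f x p)
          (some (c.insert x 1)) with
        | none => none
        | some c' => some (c', c'.getD x 0) := by
  rw [dfsA]
  rfl

lemma dfsStep_skip (edges : List (Int × Int)) (f : Nat) (x p nb : Int)
    (cc : PySem.Dict Int Int) (h : nb = p) : dfsStep edges f x p (some cc) nb = some cc := by
  simp [dfsStep, h]

lemma dfsStep_child (edges : List (Int × Int)) (f : Nat) (x p nb : Int)
    (cc cc' : PySem.Dict Int Int) (rr : Int) (h : ¬ nb = p)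
    (hrec : dfsA (buildAdjA edges) f nb x cc = some (cc', rr)) :
    dfsStep edges f x p (some cc) nb = some (cc'.insert x (cc.getD x 0 + rr)) := by
  simp [dfsStep, h, hrec]

lemma dfsA_correct (edges : List (Int × Int)) (hpre : Pre_solve edges)
    (hnd : ¬ D_solve edges) :
    ∀ (n : Nat) (x : Int), x ∈ ordE edges → (ordE edges).length - rnk edges x ≤ n →
    ∀ (f : Nat), (ordE edges).length - rnk edges x ≤ f → ∀ (c : PySem.Dict Int Int),
    ∃ c', dfsA (buildAdjA edges) f x (parD edges x) c = some (c', szE edges x) ∧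
      (∀ k, c'.getD k 0 = if k ∈ descE edges x then szE edges k else c.getD k 0) := by
  intro n
  induction n using Nat.strong_induction_on with
  | _ n ih =>
    intro x hx hn f hf c
    have hlen : rnk edges x < (ordE edges).length := rnk_lt_len edges x hx
    rcases f with _ | f'
    · omega
    obtain ⟨hnodup, hchar, hchl, hpnc⟩ := nbs_char edges hpre hnd x hx
    -- the inner loop over the neighbour list
    have GO : ∀ (rest : List Int), (∀ nb ∈ rest, nb ∈ (buildAdjA edges).getD x []) →
        ∀ (procd : List Int) (c1 : PySem.Dict Int Int),
        (∀ m ∈ procd, m ∈ childrenE edges x) →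
        (∀ k, c1.getD k 0 = stValE edges x c procd k) →
        ∃ c2, rest.foldl (dfsStep edges f' x (parD edges x)) (some c1) = some c2 ∧
          (∀ k, c2.getD k 0 = stValE edges x c
            (procd ++ rest.filter (fun nb => decide (nb ≠ parD edges x))) k) := by
      intro rest
      induction rest with
      | nil =>
        intro _ procd c1 hprocd hst
        refine ⟨c1, rfl, ?_⟩
        intro k
        rw [hst k]
        simp
      | cons nb rest' ihr =>
        intro hrest procd c1 hprocd hst
        by_cases hskip : nb = parD edges x
        · have hunfold : (nb :: rest').foldl (dfsStep edges f' x (parD edges x)) (some c1)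
              = rest'.foldl (dfsStep edges f' x (parD edges x)) (some c1) := by
            rw [List.foldl_cons, dfsStep_skip edges f' x (parD edges x) nb c1 hskip]
          rw [hunfold]
          obtain ⟨c2, heq, hval⟩ := ihr (fun m hm => hrest m (by simp [hm])) procd c1 hprocd hst
          refine ⟨c2, heq, ?_⟩
          intro k
          rw [hval k]
          have : (nb :: rest').filter (fun nb => decide (nb ≠ parD edges x))
              = rest'.filter (fun nb => decide (nb ≠ parD edges x)) := by
            rw [List.filter_cons]
            simp [hskip]
          rw [this]
        · have hnbmem : nb ∈ (buildAdjA edges).getD x [] := hrest nb (by simp)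
          have hnbchild : nb ∈ childrenE edges x := by
            rcases hchar nb hnbmem with h | h
            · exact absurd h hskip
            · exact h
          obtain ⟨hnbo, hnb0, hnbp⟩ := (mem_childrenE edges x nb).mp hnbchild
          have hnbr := (child_rnk edges x nb hnbchild).2
          have hnblen : rnk edges nb < (ordE edges).length := rnk_lt_len edges nb hnbo
          obtain ⟨c', hrec, hrecval⟩ := ih ((ordE edges).length - rnk edges nb)
            (by omega) nb hnbo (by omega) f' (by omega) c1
          rw [hnbp] at hrec
          have hunfold : (nb :: rest').foldl (dfsStep edges f' x (parD edges x)) (some c1)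
              = rest'.foldl (dfsStep edges f' x (parD edges x))
                  (some (c'.insert x (c1.getD x 0 + szE edges nb))) := by
            rw [List.foldl_cons,
              dfsStep_child edges f' x (parD edges x) nb c1 c' (szE edges nb) hskip hrec]
          rw [hunfold]
          have hst' : ∀ k, (c'.insert x (c1.getD x 0 + szE edges nb)).getD k 0
              = stValE edges x c (procd ++ [nb]) k := by
            intro k
            rw [PySem.Dict.getD_insert]
            by_cases hkx : k = x
            · subst hkx
              rw [if_pos rfl, hst k]
              unfold stValE
              rw [if_pos rfl, if_pos rfl]
              have hsum : ((procd ++ [nb]).map (szE edges)).sum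
                  = (procd.map (szE edges)).sum + szE edges nb := by simp
              rw [hsum]
              ring
            · rw [if_neg hkx, hrecval k]
              unfold stValE
              rw [if_neg hkx]
              by_cases hkd : k ∈ descE edges nb
              · rw [if_pos hkd, if_pos (by simp [List.mem_flatMap]; exact Or.inr hkd)]
              · rw [if_neg hkd, hst k]
                unfold stValE
                rw [if_neg hkx]
                have : (k ∈ (procd ++ [nb]).flatMap (descE edges))
                    ↔ (k ∈ procd.flatMap (descE edges)) := by
                  simp only [List.flatMap_append, List.mem_append]
                  constructor
                  · rintro (h | h)
                    · exact h
                    · exfalso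
                      simp [List.mem_flatMap] at h
                      exact hkd h
                  · exact Or.inl
                by_cases hkp : k ∈ procd.flatMap (descE edges)
                · rw [if_pos hkp, if_pos (this.mpr hkp)]
                · rw [if_neg hkp, if_neg (fun hc => hkp (this.mp hc))]
          obtain ⟨c2, heq, hval⟩ := ihr (fun m hm => hrest m (by simp [hm]))
            (procd ++ [nb]) (c'.insert x (c1.getD x 0 + szE edges nb))
            (by
              intro m hm
              rcases List.mem_append.mp hm with hm | hm
              · exact hprocd m hm
              · have : m = nb := by simpa using hm
                subst this
                exact hnbchild)
            hst'
          refine ⟨c2, heq, ?_⟩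
          intro k
          rw [hval k]
          have : (nb :: rest').filter (fun nb => decide (nb ≠ parD edges x))
              = nb :: rest'.filter (fun nb => decide (nb ≠ parD edges x)) := by
            rw [List.filter_cons]
            simp [hskip]
          rw [this]
          have hassoc : procd ++ [nb] ++ rest'.filter (fun nb => decide (nb ≠ parD edges x))
              = procd ++ (nb :: rest'.filter (fun nb => decide (nb ≠ parD edges x))) := by
            simp
          rw [hassoc]
    -- apply GO to the full neighbour list
    have hstart : ∀ k, (c.insert x 1).getD k 0 = stValE edges x c [] k := by
      intro k
      rw [PySem.Dict.getD_insert]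
      unfold stValE
      by_cases hkx : k = x
      · rw [if_pos hkx, if_pos hkx]
        simp
      · rw [if_neg hkx, if_neg hkx]
        simp
    obtain ⟨c2, heq, hval⟩ := GO ((buildAdjA edges).getD x []) (fun nb h => h) [] (c.insert x 1)
      (by intro m hm; simp at hm) hstart
    have hperm : (((buildAdjA edges).getD x []).filter
        (fun nb => decide (nb ≠ parD edges x))).Perm (childrenE edges x) := by
      apply nodup_perm_of_mem_iff
      · exact List.Nodup.filter _ hnodup
      · exact List.Nodup.filter _ (ord_nodup edges)
      · intro m
        rw [List.mem_filter]
        simp only [decide_eq_true_eq]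
        constructor
        · rintro ⟨h1, h2⟩
          rcases hchar m h1 with h | h
          · exact absurd h h2
          · exact h
        · intro hm
          refine ⟨hchl m hm, ?_⟩
          intro hc
          rw [hc] at hm
          exact hpnc hm
    have hfinal_x : c2.getD x 0 = szE edges x := by
      rw [hval x]
      unfold stValE
      rw [if_pos rfl]
      rw [szE_unfold edges x hx]
      congr 1
      have := (hperm.map (szE edges)).sum_eq
      simpa using this
    have hdfseq : dfsA (buildAdjA edges) (f' + 1) x (parD edges x) c
        = some (c2, szE edges x) := by
      rw [dfsA_succ, heq]
      show some (c2, c2.getD x 0) = some (c2, szE edges x)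
      rw [hfinal_x]
    refine ⟨c2, hdfseq, ?_⟩
    intro k
    rw [hval k]
    unfold stValE
    by_cases hkx : k = x
    · subst hkx
      have hself : k ∈ descE edges k := desc_self edges _ k
      rw [if_pos rfl, if_pos hself]
      rw [szE_unfold edges k hx]
      congr 1
      have := (hperm.map (szE edges)).sum_eq
      simpa using this
    · rw [if_neg hkx]
      have hiff : (k ∈ ([] ++ ((buildAdjA edges).getD x []).filter
          (fun nb => decide (nb ≠ parD edges x))).flatMap (descE edges))
          ↔ k ∈ descE edges x := by
        simp only [List.nil_append, List.mem_flatMap]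
        constructor
        · rintro ⟨m, hm, hkm⟩
          have hmc : m ∈ childrenE edges x := hperm.subset hm
          exact (descE_iff edges x hx k).mpr (Or.inr ⟨m, hmc, hkm⟩)
        · intro hk
          rcases (descE_iff edges x hx k).mp hk with rfl | ⟨m, hm, hkm⟩
          · exact absurd rfl hkx
          · exact ⟨m, (hperm.symm).subset hm, hkm⟩
      by_cases hkd : k ∈ descE edges x
      · rw [if_pos (hiff.mpr hkd), if_pos hkd]
      · rw [if_neg (fun hc => hkd (hiff.mp hc)), if_neg hkd]

-- ---------- assembly ----------

lemma solve_alt_eq_cntB (edges : List (Int × Int)) :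
    solve_alt edges = edges.map (fun p =>
      let s : Int := (cntBE edges).getD p.1 0
      let t : Int := (cntBE edges).getD p.2 0
      let m := if s < t then s else t
      m * ((cntBE edges).getD 0 0 - m)) := rfl

lemma min_eq_if (s t : Int) : min s t = if s < t then s else t := by
  rw [min_def]
  split_ifs <;> omega

lemma solve_eq (edges : List (Int × Int)) (hpre : Pre_solve edges)
    (hnd : ¬ D_solve edges) : solve edges = solve_alt edges := by
  have hL := ord_len_bound edges
  have h0 : (0 : Int) ∈ ordE edges := ord_zero_mem edges
  have hr0 : rnk edges 0 = 0 := rnk_zero edges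
  obtain ⟨c', hdfs, hvals⟩ := dfsA_correct edges hpre hnd ((ordE edges).length) 0 h0
    (by omega) (2 * edges.length + 3) (by omega) PySem.Dict.empty
  rw [parD_zero edges] at hdfs
  have hAfun : ∀ k, c'.getD k 0 = (cntBE edges).getD k 0 := by
    intro k
    rw [hvals k, cntB_getD]
    by_cases hk : k ∈ descE edges 0
    · rw [if_pos hk, if_pos (descE_sub_ord edges 0 h0 k hk)]
    · rw [if_neg hk, if_neg (fun hc => hk (ord_sub_desc0 edges k hc))]
      simp
  have hsolve : solve edges = edges.map (fun p =>
      let x := min (c'.getD p.1 0) (c'.getD p.2 0)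
      x * (c'.getD 0 0 - x)) := by
    simp only [solve]
    rw [hdfs]
  rw [hsolve, solve_alt_eq_cntB]
  apply List.map_congr_left
  intro p _
  simp only [hAfun]
  rw [min_eq_if]


-- ---------- module T : inside D_solve the two results always differ ----------

-- the vertices A's dfs can touch: visited by B's BFS and not the sentinel -1
def visA (edges : List (Int × Int)) (u : Int) : Prop :=
  u ∈ ordE edges ∧ u ≠ -1

-- the parent A's dfs passes along when it visits u
def pA (edges : List (Int × Int)) (u : Int) : Int :=
  if u = 0 then -1 else parD edges u

lemma neg_one_ord (edges : List (Int × Int)) (hd : D_solve edges) :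
    (-1 : Int) ∈ ordE edges := by
  apply ord_closed edges 0 (ord_zero_mem edges)
  rw [mem_adj]
  rcases hd with h | h
  · exact Or.inl h
  · exact Or.inr h

lemma par_neg_one (edges : List (Int × Int)) (hpre : Pre_solve edges)
    (hd : D_solve edges) : parD edges (-1) = 0 := by
  have hm1 : (-1 : Int) ∈ ordE edges := neg_one_ord edges hd
  have hq : normP (0, -1) ∈ ordPairs edges := by
    rw [mem_ordPairs]
    rcases hd with h | h
    · exact ⟨(0, -1), h, ord_zero_mem edges, hm1, rfl⟩
    · exact ⟨(-1, 0), h, hm1, ord_zero_mem edges, normP_comm _ _⟩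
  obtain ⟨v, hv, hveq⟩ := parent_surj edges hpre (normP (0, -1)) hq
  have hv0 : v ≠ 0 := (Finset.mem_erase.mp hv).1
  rcases pair_eq_of_norm hveq with ⟨h1, _⟩ | ⟨h1, h2⟩
  · exact absurd h1 hv0
  · rw [← h1, h2]

lemma closureA (edges : List (Int × Int)) (hpre : Pre_solve edges)
    (hd : D_solve edges) :
    ∀ u, visA edges u → ∀ v ∈ (buildAdjA edges).getD u [],
      v ≠ pA edges u → visA edges v ∧ pA edges v = u := by
  rintro u ⟨huo, hun1⟩ v hv hvp
  have hvo : v ∈ ordE edges := ord_closed edges u huo v hv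
  have hdich : v = parD edges u ∨ u = parD edges v := by
    rcases (mem_adj edges u v).mp hv with h | h
    · exact (tree_edge edges hpre (u, v) h (Or.inl huo)).2.2.2
    · rcases (tree_edge edges hpre (v, u) h (Or.inr huo)).2.2.2 with h' | h'
      · exact Or.inr h'
      · exact Or.inl h'
  by_cases hu0 : u = 0
  · subst hu0
    have hvn1 : v ≠ -1 := by
      intro h
      apply hvp
      rw [h, pA, if_pos rfl]
    have hpv : parD edges v = 0 := by
      rcases hdich with h | h
      · rw [parD_zero edges] at h
        exact absurd h hvn1
      · exact h.symm
    have hv0 : v ≠ 0 := by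
      intro h
      rw [h, parD_zero edges] at hpv
      exact absurd hpv (by norm_num)
    exact ⟨⟨hvo, hvn1⟩, by rw [pA, if_neg hv0, hpv]⟩
  · have hpu : pA edges u = parD edges u := by rw [pA, if_neg hu0]
    have hpv : parD edges v = u := by
      rcases hdich with h | h
      · exact absurd (by rw [hpu, ← h]) hvp
      · exact h.symm
    have hvn1 : v ≠ -1 := by
      intro h
      rw [h, par_neg_one edges hpre hd] at hpv
      exact hu0 hpv.symm
    have hv0 : v ≠ 0 := by
      intro h
      rw [h, parD_zero edges] at hpv
      exact hun1 hpv.symm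
    exact ⟨⟨hvo, hvn1⟩, by rw [pA, if_neg hv0, hpv]⟩

lemma foldl_dfsStep_none (edges : List (Int × Int)) (f : Nat) (x p : Int) :
    ∀ rest : List Int, rest.foldl (dfsStep edges f x p) none = none := by
  intro rest
  induction rest with
  | nil => rfl
  | cons nb t ih =>
    rw [List.foldl_cons]
    have : dfsStep edges f x p none nb = none := rfl
    rw [this, ih]

-- A's dfs never writes a key outside visA (in particular never the vertex -1)
lemma dfs_pres (edges : List (Int × Int)) (hpre : Pre_solve edges)
    (hd : D_solve edges) :
    ∀ (f : Nat) (x : Int) (c c' : PySem.Dict Int Int) (r : Int), visA edges x →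
      dfsA (buildAdjA edges) f x (pA edges x) c = some (c', r) →
      ∀ k, ¬ visA edges k → c'.getD k 0 = c.getD k 0 := by
  intro f
  induction f with
  | zero => intro x c c' r _ hrun; exact absurd hrun (by simp [dfsA])
  | succ f ih =>
    intro x c c' r hx hrun k hk
    have hkx : k ≠ x := fun h => hk (h ▸ hx)
    rw [dfsA_succ] at hrun
    cases hfold : ((buildAdjA edges).getD x []).foldl
        (dfsStep edges f x (pA edges x)) (some (c.insert x 1)) with
    | none => rw [hfold] at hrun; exact absurd hrun (by simp)
    | some c2 =>
      rw [hfold] at hrun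
      have hc2 : c' = c2 := by
        simp only [Option.some.injEq, Prod.mk.injEq] at hrun
        exact hrun.1.symm
      subst hc2
      have GO : ∀ (rest : List Int), (∀ nb ∈ rest, nb ∈ (buildAdjA edges).getD x []) →
          ∀ (c1 : PySem.Dict Int Int), c1.getD k 0 = c.getD k 0 →
          ∀ c2', rest.foldl (dfsStep edges f x (pA edges x)) (some c1) = some c2' →
            c2'.getD k 0 = c.getD k 0 := by
        intro rest
        induction rest with
        | nil =>
          intro _ c1 hc1 c2' heq
          have : c1 = c2' := by simpa using heq
          rw [← this]; exact hc1
        | cons nb t iht =>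
          intro hadj c1 hc1 c2' heq
          rw [List.foldl_cons] at heq
          by_cases hskip : nb = pA edges x
          · rw [dfsStep_skip edges f x (pA edges x) nb c1 hskip] at heq
            exact iht (fun m hm => hadj m (by simp [hm])) c1 hc1 c2' heq
          · obtain ⟨hvnb, hpnb⟩ :=
              closureA edges hpre hd x hx nb (hadj nb (by simp)) hskip
            cases hrec : dfsA (buildAdjA edges) f nb x c1 with
            | none =>
              have : dfsStep edges f x (pA edges x) (some c1) nb = none := by
                simp [dfsStep, hskip, hrec]
              rw [this, foldl_dfsStep_none] at heq
              exact absurd heq (by simp)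
            | some pr =>
              obtain ⟨cc', rr⟩ := pr
              have hstep : dfsStep edges f x (pA edges x) (some c1) nb
                  = some (cc'.insert x (c1.getD x 0 + rr)) :=
                dfsStep_child edges f x (pA edges x) nb c1 cc' rr hskip hrec
              rw [hstep] at heq
              have hrec' : dfsA (buildAdjA edges) f nb (pA edges nb) c1
                  = some (cc', rr) := by rw [hpnb]; exact hrec
              have hcc' : cc'.getD k 0 = c.getD k 0 := by
                rw [ih nb c1 cc' rr hvnb hrec' k hk]; exact hc1
              have hins : (cc'.insert x (c1.getD x 0 + rr)).getD k 0 = c.getD k 0 := by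
                rw [PySem.Dict.getD_insert, if_neg hkx]; exact hcc'
              exact iht (fun m hm => hadj m (by simp [hm])) _ hins c2' heq
      have hstart : (c.insert x 1).getD k 0 = c.getD k 0 := by
        rw [PySem.Dict.getD_insert, if_neg hkx]
      exact GO _ (fun nb h => h) _ hstart c' hfold

lemma min_zero_prod (a : Int) :
    min a 0 * (a - min a 0) = 0 ∧ min 0 a * (a - min 0 a) = 0 := by
  rcases le_total a 0 with h | h
  · rw [min_eq_left h, min_eq_right h]
    constructor <;> ring_nf <;> omega
  · rw [min_eq_right h, min_eq_left h]
    simp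

lemma szE_root_gt (edges : List (Int × Int)) (hpre : Pre_solve edges)
    (hd : D_solve edges) : szE edges (-1) + 1 ≤ szE edges 0 := by
  have hm1 : (-1 : Int) ∈ ordE edges := neg_one_ord edges hd
  have hchild : (-1 : Int) ∈ childrenE edges 0 :=
    (mem_childrenE edges 0 (-1)).mpr ⟨hm1, by norm_num, par_neg_one edges hpre hd⟩
  have hmem : szE edges (-1) ∈ (childrenE edges 0).map (szE edges) :=
    List.mem_map.mpr ⟨-1, hchild, rfl⟩
  have hsum : szE edges (-1) ≤ ((childrenE edges 0).map (szE edges)).sum := by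
    apply List.single_le_sum _ _ hmem
    intro y hy
    rcases List.mem_map.mp hy with ⟨m, _, rfl⟩
    have := szW_pos edges (ordE edges).length m
    unfold szE
    omega
  rw [szE_unfold edges 0 (ord_zero_mem edges)]
  omega

lemma solve_ne (edges : List (Int × Int)) (hpre : Pre_solve edges)
    (hd : D_solve edges) : solve edges ≠ solve_alt edges := by
  have hp0 : ∃ p₀, p₀ ∈ edges ∧ (p₀ = ((0 : Int), (-1 : Int)) ∨ p₀ = ((-1 : Int), (0 : Int))) := by
    rcases hd with h | h
    · exact ⟨(0, -1), h, Or.inl rfl⟩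
    · exact ⟨(-1, 0), h, Or.inr rfl⟩
  obtain ⟨p₀, hp₀mem, hp₀⟩ := hp0
  have hv0 : visA edges 0 := ⟨ord_zero_mem edges, by norm_num⟩
  have hnv1 : ¬ visA edges (-1) := fun h => h.2 rfl
  have hpA0 : pA edges 0 = -1 := by rw [pA, if_pos rfl]
  -- B's value at p₀ is positive
  have hc1 : 1 ≤ szE edges (-1) := szW_pos edges (ordE edges).length (-1)
  have hlt : szE edges (-1) + 1 ≤ szE edges 0 := szE_root_gt edges hpre hd
  have hB0 : (cntBE edges).getD 0 0 = szE edges 0 := by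
    rw [cntB_getD, if_pos (ord_zero_mem edges)]
  have hB1 : (cntBE edges).getD (-1) 0 = szE edges (-1) := by
    rw [cntB_getD, if_pos (neg_one_ord edges hd)]
  intro hcon
  -- examine what A computed
  cases hdfs : dfsA (buildAdjA edges) (2 * edges.length + 3) 0 (-1)
      PySem.Dict.empty with
  | none =>
    -- A returned [], B's list is nonempty
    have hA : solve edges = [] := by simp only [solve]; rw [hdfs]
    have hBne : solve_alt edges ≠ [] := by
      rw [solve_alt_eq_cntB]
      intro h
      rw [List.map_eq_nil_iff] at h
      rw [h] at hp₀mem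
      simp at hp₀mem
    rw [hA] at hcon
    exact hBne hcon.symm
  | some pr =>
    obtain ⟨cnt, r⟩ := pr
    have hA1 : cnt.getD (-1) 0 = 0 := by
      have := dfs_pres edges hpre hd (2 * edges.length + 3) 0 PySem.Dict.empty cnt r
        hv0 (by rw [hpA0]; exact hdfs) (-1) hnv1
      simpa using this
    have hAform : solve edges = edges.map (fun p =>
        min (cnt.getD p.1 0) (cnt.getD p.2 0)
          * (cnt.getD 0 0 - min (cnt.getD p.1 0) (cnt.getD p.2 0))) := by
      simp only [solve]; rw [hdfs]
    have hBform : solve_alt edges = edges.map (fun p =>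
        (if (cntBE edges).getD p.1 0 < (cntBE edges).getD p.2 0 then (cntBE edges).getD p.1 0
         else (cntBE edges).getD p.2 0)
        * ((cntBE edges).getD 0 0 -
           (if (cntBE edges).getD p.1 0 < (cntBE edges).getD p.2 0 then (cntBE edges).getD p.1 0
            else (cntBE edges).getD p.2 0))) := rfl
    rw [hAform, hBform] at hcon
    have heq := List.map_inj_left.mp hcon p₀ hp₀mem
    rcases hp₀ with h | h
    · subst h
      simp only [hA1, hB0, hB1] at heq
      rw [(min_zero_prod (cnt.getD 0 0)).1] at heq
      have hif : (if szE edges 0 < szE edges (-1) then szE edges 0 else szE edges (-1))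
          = szE edges (-1) := if_neg (by omega)
      rw [hif] at heq
      have hpos : 0 < szE edges (-1) * (szE edges 0 - szE edges (-1)) :=
        mul_pos (by omega) (by omega)
      omega
    · subst h
      simp only [hA1, hB0, hB1] at heq
      rw [(min_zero_prod (cnt.getD 0 0)).2] at heq
      have hif : (if szE edges (-1) < szE edges 0 then szE edges (-1) else szE edges 0)
          = szE edges (-1) := if_pos (by omega)
      rw [hif] at heq
      have hpos : 0 < szE edges (-1) * (szE edges 0 - szE edges (-1)) :=
        mul_pos (by omega) (by omega)
      omega

-- ===== VERDICT (by name: the statement is the Claim_ definition above) =====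
theorem solve_spec : Claim_unchanged_solve := by
  intro edges hdom hpre
  unfold Spec_solve
  intro hnd
  exact solve_eq edges hpre hnd

theorem solve_changed : Claim_changed_solve := by
  unfold Claim_changed_solve; decide

theorem solve_tight : Claim_exact_solve := by
  intro edges _ hpre hd
  exact solve_ne edges hpre hd
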